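-- pv_equiv track=rewrite | github.com/koyaishikawa/FinanceRL | model/env.py | create_excute_list
-- ===== SOURCE A (Python) =====
-- def create_excute_list(actions):
--     prev = 0
--     buy = []
--     sell = []
--     neutral = []
--     for i,action in enumerate(actions):
--         if prev != action:
--             if action == 1:
--                 buy.append(i)
--             elif action == 0:
--                 neutral.append(i)
--             else:
--                 sell.append(i)
--
--             prev = action
--
--     return buy, sell, neutral
-- ===== SOURCE B (Python) =====
-- def create_excute_list(actions):
--     buy, sell, neutral = [], [], []
--     n = len(actions)
--     i = 0
--     # initial neutral state: the leading run of zeros produces no entry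
--     while i < n and actions[i] == 0:
--         i += 1
--     # walk maximal runs of equal values; record each run's start index
--     while i < n:
--         a = actions[i]
--         (buy if a == 1 else neutral if a == 0 else sell).append(i)
--         j = i + 1
--         while j < n and actions[j] == a:
--             j += 1
--         i = j
--     return buy, sell, neutral
-- ===== Notes on version B (the rewrite author's own statement) =====
-- stated objective: alternative
-- what changed: Replaces the per-element prev-comparison loop with a two-pointer run scanner: skip the leading run of zeros, then repeatedly take the current run's start index, bucket it by its value, and jump the pointer past the whole maximal run of equal values.
import Mathlib
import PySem

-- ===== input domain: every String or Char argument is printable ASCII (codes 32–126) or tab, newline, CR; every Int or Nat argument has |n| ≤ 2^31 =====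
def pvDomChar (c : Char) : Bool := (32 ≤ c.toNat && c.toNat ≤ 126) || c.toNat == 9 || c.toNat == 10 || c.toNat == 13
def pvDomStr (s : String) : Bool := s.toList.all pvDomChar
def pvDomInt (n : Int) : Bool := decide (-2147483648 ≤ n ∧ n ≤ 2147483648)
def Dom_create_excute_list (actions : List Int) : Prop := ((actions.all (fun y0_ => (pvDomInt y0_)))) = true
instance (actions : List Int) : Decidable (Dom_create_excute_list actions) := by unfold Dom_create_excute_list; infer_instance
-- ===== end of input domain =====

-- B rewrites the per-element prev-comparison loop as a two-pointer run scanner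
-- (skip leading zeros, then jump run by run); alternative decomposition, same cost.


-- ===== PORT A =====
def create_excute_list (actions : List Int) : List Int × List Int × List Int :=
  let st := (PySem.List.enumerate actions 0).foldl
    (fun (st : Int × List Int × List Int × List Int) (p : Int × Int) =>
      let prev := st.1
      let i := p.1
      let action := p.2
      if prev ≠ action then
        if action == 1 then (action, st.2.1 ++ [i], st.2.2.1, st.2.2.2)
        else if action == 0 then (action, st.2.1, st.2.2.1, st.2.2.2 ++ [i])
        else (action, st.2.1, st.2.2.1 ++ [i], st.2.2.2)
      else st) (0, [], [], [])
  (st.2.1, st.2.2.1, st.2.2.2)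

-- ===== PORT B =====
-- B's inner `while` loops: skip the elements equal to `a`, carrying the index `k`
def pvSkipEq (a : Int) (k : Int) : List Int → Int × List Int
  | [] => (k, [])
  | b :: rest => if b == a then pvSkipEq a (k + 1) rest else (k, b :: rest)

lemma pvSkipEq_len (a : Int) (k : Int) (xs : List Int) :
    (pvSkipEq a k xs).2.length ≤ xs.length := by
  induction xs generalizing k with
  | nil => simp [pvSkipEq]
  | cons b rest ih =>
    simp only [pvSkipEq]
    split
    · exact le_trans (ih (k + 1)) (Nat.le_succ _)
    · simp

-- B's outer `while` loop: at each run start, bucket the index and jump past the run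
def pvRunLoop (k : Int) : List Int → List Int × List Int × List Int
  | [] => ([], [], [])
  | a :: rest =>
    let p := pvSkipEq a (k + 1) rest
    let r := pvRunLoop p.1 p.2
    if a == 1 then (k :: r.1, r.2.1, r.2.2)
    else if a == 0 then (r.1, r.2.1, k :: r.2.2)
    else (r.1, k :: r.2.1, r.2.2)
termination_by xs => xs.length
decreasing_by
  exact Nat.lt_succ_of_le (pvSkipEq_len a (k + 1) rest)

def create_excute_list_alt (actions : List Int) : List Int × List Int × List Int :=
  let p := pvSkipEq 0 0 actions
  pvRunLoop p.1 p.2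

-- ===== PRECONDITION & SPEC =====
def Spec_create_excute_list (actions : List Int) (out : List Int × List Int × List Int) : Prop := out = create_excute_list_alt actions
instance (actions : List Int) (out : List Int × List Int × List Int) : Decidable (Spec_create_excute_list actions out) := by unfold Spec_create_excute_list; infer_instance

-- ===== CLAIM (what is proved, stated in full; the proofs are below) =====
def Claim_equal_create_excute_list : Prop := ∀ (actions : List Int), Dom_create_excute_list actions → Spec_create_excute_list actions (create_excute_list actions)

-- ===== LEMMAS AND PROOFS =====

-- common reference: A's change points with prev threaded structurally
def pvRuns (prev : Int) (k : Int) : List Int → List Int × List Int × List Int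
  | [] => ([], [], [])
  | a :: rest =>
    let r := pvRuns a (k + 1) rest
    if prev ≠ a then
      if a == 1 then (k :: r.1, r.2.1, r.2.2)
      else if a == 0 then (r.1, r.2.1, k :: r.2.2)
      else (r.1, k :: r.2.1, r.2.2)
    else r

lemma pvFoldA (xs : List Int) (prev k : Int) (b s n : List Int) :
    (let st := (PySem.List.enumerate xs k).foldl
      (fun (st : Int × List Int × List Int × List Int) (p : Int × Int) =>
        if st.1 ≠ p.2 then
          if p.2 == 1 then (p.2, st.2.1 ++ [p.1], st.2.2.1, st.2.2.2)
          else if p.2 == 0 then (p.2, st.2.1, st.2.2.1, st.2.2.2 ++ [p.1])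
          else (p.2, st.2.1, st.2.2.1 ++ [p.1], st.2.2.2)
        else st) (prev, b, s, n)
     (st.2.1, st.2.2.1, st.2.2.2)) =
    (b ++ (pvRuns prev k xs).1, s ++ (pvRuns prev k xs).2.1, n ++ (pvRuns prev k xs).2.2) := by
  induction xs generalizing prev k b s n with
  | nil => simp [PySem.List.enumerate_nil, pvRuns]
  | cons a rest ih =>
    simp only [PySem.List.enumerate_cons, List.foldl_cons, pvRuns]
    by_cases hp : prev = a
    · simp only [hp, ne_eq, not_true_eq_false, if_false]
      simpa using ih a (k + 1) b s n
    · simp only [ne_eq, hp, not_false_eq_true, if_pos]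
      by_cases h1 : a = 1
      · simpa [h1] using ih a (k + 1) (b ++ [k]) s n
      · by_cases h0 : a = 0
        · simpa [h0, h1] using ih a (k + 1) b s (n ++ [k])
        · simpa [h0, h1] using ih a (k + 1) b (s ++ [k]) n

-- skipping a run of `a`s is invisible to pvRuns when prev = a
lemma pvRuns_skipEq (a : Int) (xs : List Int) (k : Int) :
    pvRuns a (pvSkipEq a k xs).1 (pvSkipEq a k xs).2 = pvRuns a k xs := by
  induction xs generalizing k with
  | nil => rfl
  | cons b rest ih =>
    by_cases hb : b = a
    · subst hb
      simp only [pvSkipEq, beq_self_eq_true, if_true]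
      rw [ih (k + 1)]
      simp [pvRuns]
    · simp [pvSkipEq, hb]

-- after skipping, the head (if any) differs from `a`
lemma pvSkipEq_head_ne (a : Int) (k : Int) (xs : List Int) (b : Int) (ys : List Int)
    (h : (pvSkipEq a k xs).2 = b :: ys) : b ≠ a := by
  induction xs generalizing k with
  | nil => simp [pvSkipEq] at h
  | cons c rest ih =>
    by_cases hc : c = a
    · subst hc
      simp only [pvSkipEq, beq_self_eq_true, if_true] at h
      exact ih (k + 1) h
    · simp only [pvSkipEq, beq_iff_eq, hc, if_false] at h
      injection h with h1 _
      exact h1 ▸ hc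

-- B's run loop computes pvRuns whenever prev differs from the head
lemma pvRunLoop_eq (n : ℕ) : ∀ (xs : List Int), xs.length ≤ n → ∀ (k c : Int),
    (∀ b ys, xs = b :: ys → b ≠ c) → pvRunLoop k xs = pvRuns c k xs := by
  induction n with
  | zero =>
    intro xs hlen k c _
    have : xs = [] := List.eq_nil_of_length_eq_zero (Nat.le_zero.mp hlen)
    subst this; simp [pvRunLoop, pvRuns]
  | succ m ih =>
    intro xs hlen k c hne
    cases xs with
    | nil => simp [pvRunLoop, pvRuns]
    | cons a rest =>
      have ha : a ≠ c := hne a rest rfl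
      have hrec : pvRunLoop (pvSkipEq a (k + 1) rest).1 (pvSkipEq a (k + 1) rest).2
          = pvRuns a (k + 1) rest := by
        rw [ih (pvSkipEq a (k + 1) rest).2
            (le_trans (pvSkipEq_len a (k + 1) rest) (Nat.le_of_succ_le_succ hlen))
            (pvSkipEq a (k + 1) rest).1 a
            (fun b ys h => pvSkipEq_head_ne a (k + 1) rest b ys h)]
        exact pvRuns_skipEq a rest (k + 1)
      simp only [pvRunLoop, hrec, pvRuns, ne_eq]
      rw [if_pos (show ¬c = a from fun h => ha h.symm)]

-- ===== VERDICT (by name: the statement is the Claim_ definition above) =====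
theorem create_excute_list_spec : Claim_equal_create_excute_list := by
  intro actions _
  show create_excute_list actions = create_excute_list_alt actions
  have hA := pvFoldA actions 0 0 [] [] []
  simp only [List.nil_append] at hA
  have hB : create_excute_list_alt actions = pvRuns 0 0 actions := by
    rw [create_excute_list_alt]
    rw [pvRunLoop_eq (pvSkipEq 0 0 actions).2.length _ le_rfl _ 0
        (fun b ys h => pvSkipEq_head_ne 0 0 actions b ys h)]
    exact pvRuns_skipEq 0 actions 0
  rw [hB]
  exact hA
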